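-- pv_equiv track=rewrite | github.com/tut-tuuut/advent-of-code-shiny-giggle | 2020/06/code.py | count_unanimous_answers_in_group
-- ===== SOURCE A (Python) =====
-- def count_unanimous_answers_in_group(group):
--     individual_answers = group.splitlines()
--     # we are looking for characters which are in *all* answers:
--     # so they are in the first answer.
--     first_answer = individual_answers[0]
--     # count all characters of the first answer we can find in every answer.
--     return sum(
--         1
--         for character in first_answer
--         if all(character in answer for answer in individual_answers)
--     )
-- ===== SOURCE B (Python) =====
-- def count_unanimous_answers_in_group(group):
--     answers = group.splitlines()
--     first = answers[0]
--     common = set(first)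
--     for answer in answers[1:]:
--         common &= set(answer)
--     return sum(1 for c in first if c in common)
-- ===== Notes on version B (the rewrite author's own statement) =====
-- stated objective: faster
-- what changed: Instead of re-scanning every line for each character of the first answer, B builds the intersection set of all lines once and then counts the first line's characters in a single membership pass.
-- outside the precondition, e.g. on count_unanimous_answers_in_group(''): A raises IndexError, B raises IndexError
import Mathlib
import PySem

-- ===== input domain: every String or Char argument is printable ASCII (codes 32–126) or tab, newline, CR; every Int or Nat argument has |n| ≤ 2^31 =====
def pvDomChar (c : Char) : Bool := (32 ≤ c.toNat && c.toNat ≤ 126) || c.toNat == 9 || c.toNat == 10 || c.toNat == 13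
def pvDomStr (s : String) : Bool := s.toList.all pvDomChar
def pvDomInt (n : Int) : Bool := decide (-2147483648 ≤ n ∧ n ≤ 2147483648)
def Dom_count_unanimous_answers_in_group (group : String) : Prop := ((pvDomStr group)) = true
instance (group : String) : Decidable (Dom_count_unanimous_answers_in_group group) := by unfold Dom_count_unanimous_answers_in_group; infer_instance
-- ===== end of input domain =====

-- B replaces A's per-character rescans of all lines by one intersection set built once,
-- then a single counting pass over the first line (objective: idiomatic).

-- ===== PORT A =====
-- Lines are handled as lists of characters; Python's `character in answer` with a
-- single character is exactly List.contains on the line's characters.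
def count_unanimous_answers_in_group (group : String) : Int :=
  let individual_answers := (PySem.Str.splitlines group).map String.toList
  match individual_answers with
  | [] => 0  -- Python raises IndexError here (group = ""); excluded by Pre_
  | first_answer :: _ =>
      first_answer.foldl (fun acc character =>
        if individual_answers.all (fun answer => answer.contains character)
        then acc + 1 else acc) 0

-- ===== PORT B =====
def count_unanimous_answers_in_group_alt (group : String) : Int :=
  let answers := (PySem.Str.splitlines group).map String.toList
  match answers with
  | [] => 0  -- answers[0] raises IndexError here (group = ""); excluded by Pre_
  | first :: rest =>
      let common :=
        rest.foldl (fun s a => PySem.Set.inter s (PySem.Set.ofList a))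
          (PySem.Set.ofList first)
      first.foldl (fun acc c => if common.contains c then acc + 1 else acc) 0

-- ===== PRECONDITION & SPEC =====
-- Pre_ excludes only group = "", on which splitlines() is empty and A raises IndexError.
def Pre_count_unanimous_answers_in_group (group : String) : Prop := group ≠ ""
instance (group : String) : Decidable (Pre_count_unanimous_answers_in_group group) := by unfold Pre_count_unanimous_answers_in_group; infer_instance
def pvWitness_count_unanimous_answers_in_group : String := "abc\nbcd\ncb"
def Spec_count_unanimous_answers_in_group (group : String) (out : Int) : Prop := out = count_unanimous_answers_in_group_alt group
instance (group : String) (out : Int) : Decidable (Spec_count_unanimous_answers_in_group group out) := by unfold Spec_count_unanimous_answers_in_group; infer_instance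

-- ===== CLAIM (what is proved, stated in full; the proofs are below) =====
def Claim_equal_count_unanimous_answers_in_group : Prop := ∀ (group : String), Dom_count_unanimous_answers_in_group group → Pre_count_unanimous_answers_in_group group → Spec_count_unanimous_answers_in_group group (count_unanimous_answers_in_group group)

-- ===== LEMMAS AND PROOFS =====

-- membership in the intersection fold = membership in the seed and in every line
theorem contains_foldl_inter (rest : List (List Char)) (s : PySem.Set Char) (c : Char) :
    (rest.foldl (fun s a => PySem.Set.inter s (PySem.Set.ofList a)) s).contains c
      = (s.contains c && rest.all (fun a => a.contains c)) := by
  induction rest generalizing s with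
  | nil => simp
  | cons a rest ih =>
    simp only [List.foldl_cons, List.all_cons, ih]
    simp [pysem, Bool.and_assoc]

theorem count_unanimous_answers_in_group_spec' (group : String)
    (_h : Pre_count_unanimous_answers_in_group group) :
    count_unanimous_answers_in_group group = count_unanimous_answers_in_group_alt group := by
  unfold count_unanimous_answers_in_group count_unanimous_answers_in_group_alt
  cases hl : (PySem.Str.splitlines group).map String.toList with
  | nil => rfl
  | cons first rest =>
    simp only
    apply PySem.List.foldl_congr_mem
    intro acc c hc
    rw [contains_foldl_inter]
    simp [pysem]

-- ===== VERDICT (by name: the statement is the Claim_ definition above) =====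
theorem count_unanimous_answers_in_group_spec : Claim_equal_count_unanimous_answers_in_group := by
  intro group _ hpre
  exact count_unanimous_answers_in_group_spec' group hpre
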